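-- pv_equiv track=rewrite | github.com/starcrown001/test_flashmask | benchmark_magiattention_cp.py | generate_share_question_mask
-- ===== SOURCE A (Python) =====
-- def seqlens2cu_seqlens(seqlens: list[int]) -> list[int]:
--     """transfer seqlens list to cu_seqlens, do not have check"""
--     cu_seqlens = [0]
--     for seqlen in seqlens:
--         cu_seqlens.append(cu_seqlens[-1] + seqlen)
--     return cu_seqlens
--
-- def generate_share_question_mask(doc_seq_lens=[2538, 1742, 3213]) -> tuple[list[list[int]], list[list[int]], list[bool]]:
--     """generate share question mask"""
--     seqlens = doc_seq_lens
--     seqlens_flatten = [num for sublist in seqlens for num in sublist]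
--     cu_seqlens = seqlens2cu_seqlens(seqlens_flatten)
--
--     q_ranges: list[list[int]] = []
--     k_ranges: list[list[int]] = []
--     is_causal_mapping: list[bool] = []
--     cu_seqlens_offset = 0
--     for i in range(len(seqlens)):
--         total_seqlen = sum(seqlens[i])
--         for j in range(len(seqlens[i])):
--             if j == 1:
--                 q_ranges[-1] = [cu_seqlens[cu_seqlens_offset] , cu_seqlens[cu_seqlens_offset + j + 1]]
--                 k_ranges[-1] = [cu_seqlens[cu_seqlens_offset], cu_seqlens[cu_seqlens_offset + j + 1]]
--
--                 q_ranges.append([cu_seqlens[cu_seqlens_offset + j + 1], cu_seqlens[cu_seqlens_offset] +total_seqlen])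
--                 k_ranges.append([cu_seqlens[cu_seqlens_offset], cu_seqlens[cu_seqlens_offset + j]])
--                 is_causal_mapping.append(False)
--             else:
--                 q_ranges.append([cu_seqlens[cu_seqlens_offset + j] , cu_seqlens[cu_seqlens_offset + j + 1]])
--                 k_ranges.append([cu_seqlens[cu_seqlens_offset + j], cu_seqlens[cu_seqlens_offset + j + 1]])
--                 is_causal_mapping.append(True)
--         cu_seqlens_offset += len(seqlens[i])
--
--     return (q_ranges, k_ranges, is_causal_mapping)
-- ===== SOURCE B (Python) =====
-- def generate_share_question_mask(doc_seq_lens=[2538, 1742, 3213]) -> tuple[list[list[int]], list[list[int]], list[bool]]: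
--     """generate share question mask (direct emission: no retroactive patching of the last entry)"""
--     seqlens = doc_seq_lens
--     seqlens_flatten = [num for sublist in seqlens for num in sublist]
--     cu = [0]
--     running = 0
--     for s in seqlens_flatten:
--         running += s
--         cu.append(running)
--
--     q_ranges: list[list[int]] = []
--     k_ranges: list[list[int]] = []
--     is_causal_mapping: list[bool] = []
--     off = 0
--     for sub in seqlens:
--         n = len(sub)
--         if n == 1:
--             q_ranges.append([cu[off], cu[off + 1]])
--             k_ranges.append([cu[off], cu[off + 1]])
--             is_causal_mapping.append(True)
--         elif n >= 2:
--             # combined question block (causal), then the shared block (non-causal)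
--             q_ranges.append([cu[off], cu[off + 2]])
--             k_ranges.append([cu[off], cu[off + 2]])
--             is_causal_mapping.append(True)
--             q_ranges.append([cu[off + 2], cu[off + n]])
--             k_ranges.append([cu[off], cu[off + 1]])
--             is_causal_mapping.append(False)
--             for j in range(2, n):
--                 q_ranges.append([cu[off + j], cu[off + j + 1]])
--                 k_ranges.append([cu[off + j], cu[off + j + 1]])
--                 is_causal_mapping.append(True)
--         off += n
--     return (q_ranges, k_ranges, is_causal_mapping)
-- ===== Notes on version B (the rewrite author's own statement) =====
-- stated objective: simpler
-- what changed: Each document's entries are emitted directly by a case split on its sub-sequence count (0 / 1 / >=2), using cu[off+n] for the document end, instead of A's emit-then-retroactively-patch of q_ranges[-1]/k_ranges[-1] at j==1 and cu[off]+sum recomputation.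
import Mathlib
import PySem

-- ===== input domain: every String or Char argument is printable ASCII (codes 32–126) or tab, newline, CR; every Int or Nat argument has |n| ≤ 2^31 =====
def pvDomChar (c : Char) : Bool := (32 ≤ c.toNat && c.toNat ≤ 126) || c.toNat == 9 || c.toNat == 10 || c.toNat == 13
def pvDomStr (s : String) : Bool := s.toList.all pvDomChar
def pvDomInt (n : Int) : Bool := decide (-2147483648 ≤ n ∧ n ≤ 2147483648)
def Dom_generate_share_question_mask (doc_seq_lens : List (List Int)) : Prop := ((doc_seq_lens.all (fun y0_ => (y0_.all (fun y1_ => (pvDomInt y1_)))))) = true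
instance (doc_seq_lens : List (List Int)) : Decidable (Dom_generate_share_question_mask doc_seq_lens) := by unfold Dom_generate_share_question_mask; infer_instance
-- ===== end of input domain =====

-- B replaces A's emit-then-patch of the last q/k entry at j==1 by direct per-document
-- emission split on the sub-sequence count (simpler); return values are proved equal.

-- ===== PORT A =====
-- cu_seqlens indices reached by the loops are always in range, so List.getD … 0 is
-- exact for Python's cu_seqlens[idx] on every admitted input (no IndexError occurs).
def seqlens2cu_seqlens (seqlens : List Int) : List Int :=
  seqlens.foldl (fun cu s => cu ++ [cu.getLastD 0 + s]) [0]

def aStep (cu : List Int) (st : List (List Int) × List (List Int) × List Bool × Nat)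
    (sub : List Int) : List (List Int) × List (List Int) × List Bool × Nat :=
  let off := st.2.2.2
  let total := sub.sum
  let inner := (List.range sub.length).foldl
    (fun (t : List (List Int) × List (List Int) × List Bool) j =>
      if j == 1 then
        (t.1.dropLast ++ [[cu.getD off 0, cu.getD (off + j + 1) 0],
                          [cu.getD (off + j + 1) 0, cu.getD off 0 + total]],
         t.2.1.dropLast ++ [[cu.getD off 0, cu.getD (off + j + 1) 0],
                            [cu.getD off 0, cu.getD (off + j) 0]],
         t.2.2 ++ [false])
      else
        (t.1 ++ [[cu.getD (off + j) 0, cu.getD (off + j + 1) 0]],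
         t.2.1 ++ [[cu.getD (off + j) 0, cu.getD (off + j + 1) 0]],
         t.2.2 ++ [true]))
    (st.1, st.2.1, st.2.2.1)
  (inner.1, inner.2.1, inner.2.2, off + sub.length)

def generate_share_question_mask (doc_seq_lens : List (List Int)) :
    List (List Int) × List (List Int) × List Bool :=
  let seqlens_flatten := doc_seq_lens.flatten
  let cu_seqlens := seqlens2cu_seqlens seqlens_flatten
  let st := doc_seq_lens.foldl (aStep cu_seqlens) ([], [], [], 0)
  (st.1, st.2.1, st.2.2.1)

-- ===== PORT B =====
def bCu (flat : List Int) : List Int :=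
  (flat.foldl (fun (p : List Int × Int) s => (p.1 ++ [p.2 + s], p.2 + s)) ([0], 0)).1

def bStep (cu : List Int) (st : List (List Int) × List (List Int) × List Bool × Nat)
    (sub : List Int) : List (List Int) × List (List Int) × List Bool × Nat :=
  let off := st.2.2.2
  let n := sub.length
  let next :=
    if n == 1 then
      (st.1 ++ [[cu.getD off 0, cu.getD (off + 1) 0]],
       st.2.1 ++ [[cu.getD off 0, cu.getD (off + 1) 0]],
       st.2.2.1 ++ [true])
    else if 2 ≤ n then
      let q2 := st.1 ++ [[cu.getD off 0, cu.getD (off + 2) 0],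
                         [cu.getD (off + 2) 0, cu.getD (off + n) 0]]
      let k2 := st.2.1 ++ [[cu.getD off 0, cu.getD (off + 2) 0],
                           [cu.getD off 0, cu.getD (off + 1) 0]]
      let c2 := st.2.2.1 ++ [true, false]
      (List.range' 2 (n - 2)).foldl
        (fun (t : List (List Int) × List (List Int) × List Bool) j =>
          (t.1 ++ [[cu.getD (off + j) 0, cu.getD (off + j + 1) 0]],
           t.2.1 ++ [[cu.getD (off + j) 0, cu.getD (off + j + 1) 0]],
           t.2.2 ++ [true]))
        (q2, k2, c2)
    else (st.1, st.2.1, st.2.2.1)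
  (next.1, next.2.1, next.2.2, off + n)

def generate_share_question_mask_alt (doc_seq_lens : List (List Int)) :
    List (List Int) × List (List Int) × List Bool :=
  let flat := doc_seq_lens.flatten
  let cu := bCu flat
  let st := doc_seq_lens.foldl (bStep cu) ([], [], [], 0)
  (st.1, st.2.1, st.2.2.1)

-- ===== PRECONDITION & SPEC =====
def Spec_generate_share_question_mask (doc_seq_lens : List (List Int)) (out : List (List Int) × List (List Int) × List Bool) : Prop := out = generate_share_question_mask_alt doc_seq_lens
instance (doc_seq_lens : List (List Int)) (out : List (List Int) × List (List Int) × List Bool) : Decidable (Spec_generate_share_question_mask doc_seq_lens out) := by unfold Spec_generate_share_question_mask; infer_instance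

-- ===== CLAIM (what is proved, stated in full; the proofs are below) =====
def Claim_equal_generate_share_question_mask : Prop := ∀ (doc_seq_lens : List (List Int)), Dom_generate_share_question_mask doc_seq_lens → Spec_generate_share_question_mask doc_seq_lens (generate_share_question_mask doc_seq_lens)

-- ===== LEMMAS AND PROOFS =====

/-- running prefix sums of `xs` starting from `t` (without the leading `t`). -/
def psums (t : Int) : List Int → List Int
  | [] => []
  | s :: r => (t + s) :: psums (t + s) r

lemma bCu_foldl (xs : List Int) : ∀ (acc : List Int) (t : Int),
    (xs.foldl (fun (p : List Int × Int) s => (p.1 ++ [p.2 + s], p.2 + s)) (acc, t)).1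
      = acc ++ psums t xs := by
  induction xs with
  | nil => intro acc t; simp [psums]
  | cons s r ih => intro acc t; simp [psums, ih (acc ++ [t + s]) (t + s)]

lemma bCu_eq (xs : List Int) : bCu xs = 0 :: psums 0 xs := by
  simpa using bCu_foldl xs [0] 0

lemma cuA_foldl (xs : List Int) : ∀ (acc : List Int) (t : Int), acc.getLastD 0 = t →
    xs.foldl (fun cu s => cu ++ [cu.getLastD 0 + s]) acc = acc ++ psums t xs := by
  induction xs with
  | nil => intro acc t _; simp [psums]
  | cons s r ih =>
      intro acc t h
      simp only [List.foldl_cons, psums, h]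
      rw [ih (acc ++ [t + s]) (t + s) (by simp)]
      simp

lemma cuA_eq (xs : List Int) : seqlens2cu_seqlens xs = 0 :: psums 0 xs := by
  unfold seqlens2cu_seqlens
  simpa using cuA_foldl xs [0] 0 rfl

lemma psums_getD (xs : List Int) : ∀ (t : Int) (i : Nat), i < xs.length →
    (psums t xs).getD i 0 = t + (xs.take (i + 1)).sum := by
  induction xs with
  | nil => intro t i h; simp at h
  | cons s r ih =>
      intro t i h
      cases i with
      | zero => simp [psums]
      | succ k =>
          simp only [psums, List.getD_cons_succ, List.take_succ_cons, List.sum_cons]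
          rw [ih (t + s) k (by simpa using h)]
          ring

lemma cu_getD (xs : List Int) (i : Nat) (h : i ≤ xs.length) :
    (0 :: psums 0 xs).getD i 0 = (xs.take i).sum := by
  cases i with
  | zero => simp
  | succ k =>
      simp only [List.getD_cons_succ]
      rw [psums_getD xs 0 k (by omega)]
      simp

lemma take_of_prefix_drop {flat sub : List Int} {off : Nat}
    (hpre : sub <+: List.drop off flat) (j : Nat) (hj : j ≤ sub.length) :
    (flat.drop off).take j = sub.take j := by
  obtain ⟨t, ht⟩ := hpre
  rw [← ht, List.take_append_of_le_length hj]

lemma sum_take_add {flat sub : List Int} {off : Nat}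
    (hpre : sub <+: flat.drop off) (j : Nat) (hj : j ≤ sub.length) :
    (flat.take (off + j)).sum = (flat.take off).sum + (sub.take j).sum := by
  rw [List.take_add, List.sum_append, take_of_prefix_drop hpre j hj]

lemma prefix_length_le {flat sub : List Int} {off : Nat}
    (hoff : off ≤ flat.length) (hpre : sub <+: flat.drop off) :
    off + sub.length ≤ flat.length := by
  have := hpre.length_le
  simp [List.length_drop] at this
  omega

lemma step_eq (flat : List Int) (st : List (List Int) × List (List Int) × List Bool × Nat)
    (sub : List Int) (hoff : st.2.2.2 ≤ flat.length) (hpre : sub <+: flat.drop st.2.2.2) :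
    aStep (0 :: psums 0 flat) st sub = bStep (0 :: psums 0 flat) st sub := by
  obtain ⟨q, k, c, off⟩ := st
  simp only at hoff hpre
  have hg : ∀ i : Nat, i ≤ flat.length → (0 :: psums 0 flat).getD i 0 = (flat.take i).sum :=
    fun i hi => cu_getD flat i hi
  have hlen := prefix_length_le hoff hpre
  -- key identity: cu[off] + sum(sub) = cu[off + n]
  have hkey : (0 :: psums 0 flat).getD off 0 + sub.sum
      = (0 :: psums 0 flat).getD (off + sub.length) 0 := by
    rw [hg off hoff, hg (off + sub.length) hlen,
      sum_take_add hpre sub.length le_rfl, List.take_of_length_le le_rfl]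
  rcases hn : sub.length with _ | n
  · -- empty document
    simp [aStep, bStep, hn]
  · rcases n with _ | m
    · -- single sub-sequence
      simp [aStep, bStep, hn, List.range_succ]
    · -- at least two sub-sequences
      have hrange : List.range (m + 2) = [0, 1] ++ (List.range m).map (fun x => 2 + x) := by
        have := List.range_add (n := 2) (m := m)
        simpa [Nat.add_comm 2 m] using this
      simp only [aStep, bStep, hn, hrange]
      rw [List.range'_eq_map_range]
      simp only [List.foldl_append, List.foldl_cons, List.foldl_nil, List.foldl_map]
      have h2 : ((0 : Nat) == 1) = false := by decide
      have h3 : ((1 : Nat) == 1) = true := by decide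
      simp only [h2, h3, if_false, if_true, Bool.false_eq_true, List.dropLast_concat]
      have hif : (m + 2 == 1) = false := by simp
      have hle : (2 ≤ m + 2) := by omega
      simp only [hif, Bool.false_eq_true, if_false, if_pos hle]
      rw [hn] at hkey
      rw [← hkey]
      have harg : ∀ (t : List (List Int) × List (List Int) × List Bool) (x : Nat),
          (if (2 + x == 1) = true then
            (t.1.dropLast ++ [[(0 :: psums 0 flat).getD off 0, (0 :: psums 0 flat).getD (off + (2 + x) + 1) 0],
                              [(0 :: psums 0 flat).getD (off + (2 + x) + 1) 0, (0 :: psums 0 flat).getD off 0 + sub.sum]],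
             t.2.1.dropLast ++ [[(0 :: psums 0 flat).getD off 0, (0 :: psums 0 flat).getD (off + (2 + x) + 1) 0],
                                [(0 :: psums 0 flat).getD off 0, (0 :: psums 0 flat).getD (off + (2 + x)) 0]],
             t.2.2 ++ [false])
          else
            (t.1 ++ [[(0 :: psums 0 flat).getD (off + (2 + x)) 0, (0 :: psums 0 flat).getD (off + (2 + x) + 1) 0]],
             t.2.1 ++ [[(0 :: psums 0 flat).getD (off + (2 + x)) 0, (0 :: psums 0 flat).getD (off + (2 + x) + 1) 0]],
             t.2.2 ++ [true]))
          = (t.1 ++ [[(0 :: psums 0 flat).getD (off + (2 + x)) 0, (0 :: psums 0 flat).getD (off + (2 + x) + 1) 0]],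
             t.2.1 ++ [[(0 :: psums 0 flat).getD (off + (2 + x)) 0, (0 :: psums 0 flat).getD (off + (2 + x) + 1) 0]],
             t.2.2 ++ [true]) := by
        intro t x
        have hne : (2 + x == 1) = false := beq_eq_false_iff_ne.mpr (by omega)
        simp [hne]
      simp only [harg]
      simp [List.append_assoc]

lemma outer_eq (flat : List Int) : ∀ (todo : List (List Int))
    (st : List (List Int) × List (List Int) × List Bool × Nat),
    st.2.2.2 ≤ flat.length → todo.flatten <+: flat.drop st.2.2.2 →
    todo.foldl (aStep (0 :: psums 0 flat)) st = todo.foldl (bStep (0 :: psums 0 flat)) st := by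
  intro todo
  induction todo with
  | nil => intro st _ _; rfl
  | cons sub rest ih =>
      intro st hoff hpre
      simp only [List.flatten_cons] at hpre
      have hsub : sub <+: flat.drop st.2.2.2 :=
        (List.prefix_append sub rest.flatten).trans hpre
      simp only [List.foldl_cons, step_eq flat st sub hoff hsub]
      apply ih
      · have := prefix_length_le hoff hsub
        simp [bStep]
        omega
      · obtain ⟨t, ht⟩ := hpre
        have hb : (bStep (0 :: psums 0 flat) st sub).2.2.2 = st.2.2.2 + sub.length := by
          simp [bStep]
        rw [hb]
        refine ⟨t, ?_⟩
        have hd : flat.drop (st.2.2.2 + sub.length) = (flat.drop st.2.2.2).drop sub.length := by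
          simp [List.drop_drop]
        rw [hd, ← ht]
        simp

-- ===== VERDICT (by name: the statement is the Claim_ definition above) =====
theorem generate_share_question_mask_spec : Claim_equal_generate_share_question_mask := by
  intro l _
  show generate_share_question_mask l = generate_share_question_mask_alt l
  simp only [generate_share_question_mask, generate_share_question_mask_alt, cuA_eq, bCu_eq]
  rw [outer_eq l.flatten l ([], [], [], 0) (by simp) (by simp)]
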